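-- pv_equiv track=rewrite | github.com/Sinan070/GTU | CSE-331-Introduction-to-Algorithm-Design/HW5/hw5.py | longest_increasing_sub_array
-- ===== SOURCE A (Python) =====
-- def longest_increasing_sub_array(array):
--     n = len(array)
--     end = n
--     result = [1]*n
--     for i in range (n-1 , -1 , -1):
--         for j in range (i+1,end):
--             if(array[i] < array[j]):
--                 result[i] = max(result[i], 1+result[j])
--             else :
--
--                 end = i+1
--                 break
--     return max(result)
-- ===== SOURCE B (Python) =====
-- def longest_increasing_sub_array(array):
--     best = 0
--     run = 0
--     prev = None
--     for x in reversed(array):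
--         run = run + 1 if prev is not None and x < prev else 1
--         if run > best:
--             best = run
--         prev = x
--     return best
-- ===== Notes on version B (the rewrite author's own statement) =====
-- stated objective: faster
-- what changed: Replaces A's backward nested scan with a shrinking window and a per-index result array by a single right-to-left pass that tracks the current strictly-increasing run length and its running maximum.
-- outside the precondition, e.g. on longest_increasing_sub_array([]): A raises ValueError, B returns 0
import Mathlib
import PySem

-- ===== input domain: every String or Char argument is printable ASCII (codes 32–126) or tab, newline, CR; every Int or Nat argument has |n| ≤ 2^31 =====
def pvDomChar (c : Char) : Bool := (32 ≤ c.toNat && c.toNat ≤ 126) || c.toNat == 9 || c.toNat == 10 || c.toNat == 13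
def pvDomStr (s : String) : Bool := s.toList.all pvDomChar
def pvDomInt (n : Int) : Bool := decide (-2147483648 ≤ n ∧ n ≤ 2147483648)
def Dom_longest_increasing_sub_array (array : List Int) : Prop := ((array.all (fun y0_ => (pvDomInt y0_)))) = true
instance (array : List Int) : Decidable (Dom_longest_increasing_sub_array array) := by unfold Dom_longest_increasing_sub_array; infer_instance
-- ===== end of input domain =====

-- B replaces A's O(n^2) backward nested scan (shrinking window + per-index result list)
-- by a single O(n) right-to-left pass tracking the current increasing-run length and its maximum.

-- ===== PORT A =====
-- inner 'for j in range(i+1, end)' loop with its break; indices stay in range, so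
-- indexing is ported with the total pyGetD/pySetD forms (exact on in-range indices).
def pvInnerA (array : List Int) (i : Int) : List Int → List Int → Int → List Int × Int
  | [], result, endv => (result, endv)
  | j :: js, result, endv =>
    if PySem.List.pyGetD array i 0 < PySem.List.pyGetD array j 0 then
      pvInnerA array i js
        (PySem.List.pySetD result i
          (max (PySem.List.pyGetD result i 0) (1 + PySem.List.pyGetD result j 0))) endv
    else
      (result, i + 1)

-- outer 'for i in range(n-1, -1, -1)' loop
def pvOuterA (array : List Int) : List Int → List Int → Int → List Int × Int
  | [], result, endv => (result, endv)
  | i :: is, result, endv =>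
    let p := pvInnerA array i (PySem.List.pyRange (i + 1) endv 1) result endv
    pvOuterA array is p.1 p.2

def longest_increasing_sub_array (array : List Int) : Int :=
  let n : Int := (array.length : Int)
  let result : List Int := List.replicate array.length 1
  let p := pvOuterA array (PySem.List.pyRange (n - 1) (-1) (-1)) result n
  (PySem.List.max? p.1 (fun x => x)).getD 0  -- max(result); Python raises on [] — excluded by Pre_

-- ===== PORT B =====
def pvAltStep (s : Int × Int × Option Int) (x : Int) : Int × Int × Option Int :=
  let run' : Int :=
    match s.2.2 with
    | some p => if x < p then s.2.1 + 1 else 1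
    | none => 1
  let best' : Int := if run' > s.1 then run' else s.1
  (best', run', some x)

def longest_increasing_sub_array_alt (array : List Int) : Int :=
  (array.reverse.foldl pvAltStep (0, 0, none)).1

-- ===== PRECONDITION & SPEC =====
-- Pre_ excludes only the empty list, on which Python's max([]) raises ValueError.
def Pre_longest_increasing_sub_array (array : List Int) : Prop := array ≠ []
instance (array : List Int) : Decidable (Pre_longest_increasing_sub_array array) := by
  unfold Pre_longest_increasing_sub_array; infer_instance

def pvWitness_longest_increasing_sub_array : List Int := [1, 3, 2]

def Spec_longest_increasing_sub_array (array : List Int) (out : Int) : Prop :=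
  out = longest_increasing_sub_array_alt array
instance (array : List Int) (out : Int) : Decidable (Spec_longest_increasing_sub_array array out) := by
  unfold Spec_longest_increasing_sub_array; infer_instance

-- ===== CLAIM (what is proved, stated in full; the proofs are below) =====
def Claim_equal_longest_increasing_sub_array : Prop :=
  ∀ (array : List Int), Dom_longest_increasing_sub_array array →
    Pre_longest_increasing_sub_array array →
    Spec_longest_increasing_sub_array array (longest_increasing_sub_array array)


-- ===== LEMMAS AND PROOFS =====

-- length of the strictly increasing run starting at the head
def pvHrun : List Int → Int
  | [] => 0
  | [_] => 1
  | x :: y :: t => if x < y then 1 + pvHrun (y :: t) else 1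

-- maximum run length over all suffixes
def pvMrun : List Int → Int
  | [] => 0
  | x :: t => if pvHrun (x :: t) > pvMrun t then pvHrun (x :: t) else pvMrun t

-- A's result list after all outer iterations down to index i
def pvR (array : List Int) (i : Nat) : List Int :=
  (List.range array.length).map (fun k => if k < i then 1 else pvHrun (array.drop k))

-- A's 'end' variable before processing index i-1
def pvE (array : List Int) (i : Nat) : Int :=
  if i < array.length then (i : Int) + pvHrun (array.drop i) else (array.length : Int)

theorem pvHrun_pos (l : List Int) (h : l ≠ []) : 1 ≤ pvHrun l := by
  match l with
  | [x] => simp [pvHrun]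
  | x :: y :: t =>
    have := pvHrun_pos (y :: t) (by simp)
    simp only [pvHrun]; split <;> omega

theorem pvHrun_le (l : List Int) : pvHrun l ≤ l.length := by
  match l with
  | [] => simp [pvHrun]
  | [x] => simp [pvHrun]
  | x :: y :: t =>
    have := pvHrun_le (y :: t)
    simp only [pvHrun] at *; split <;> simp_all <;> omega

theorem pvGet (array : List Int) (i : Nat) (h : i < array.length) :
    PySem.List.pyGetD array (↑i) 0 = array[i] := by
  rw [PySem.List.pyGetD_natCast]; exact List.getD_eq_getElem _ _ h

theorem pvHr_eq (array : List Int) (i : Nat) (h : i < array.length) :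
    pvHrun (array.drop i) =
      if i + 1 < array.length ∧ PySem.List.pyGetD array (↑i) 0 < PySem.List.pyGetD array (↑(i+1)) 0
      then 1 + pvHrun (array.drop (i+1)) else 1 := by
  have hd : array.drop i = array[i] :: array.drop (i+1) := List.drop_eq_getElem_cons h
  by_cases h2 : i + 1 < array.length
  · have hd2 : array.drop (i+1) = array[i+1] :: array.drop (i+2) := List.drop_eq_getElem_cons h2
    rw [hd, hd2, pvHrun, pvGet array i h, pvGet array (i+1) h2, ← hd2]
    simp [h2]
  · have hnil : array.drop (i+1) = [] := by rw [List.drop_eq_nil_iff]; omega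
    rw [hd, hnil]
    simp [pvHrun, h2]

theorem pvRun (array : List Int) (i : Nat) (hi : i < array.length) :
    ∀ k : Nat, 1 ≤ k → (k : Int) < pvHrun (array.drop i) →
      i + k < array.length ∧
      pvHrun (array.drop (i + k)) = pvHrun (array.drop i) - k ∧
      PySem.List.pyGetD array (↑i) 0 < PySem.List.pyGetD array (↑(i + k)) 0 := by
  intro k
  induction k with
  | zero => omega
  | succ k ih =>
    intro _ hk
    by_cases hk1 : k = 0
    · subst hk1
      have h := pvHr_eq array i hi
      rw [h] at hk ⊢
      by_cases hc : i + 1 < array.length ∧ PySem.List.pyGetD array (↑i) 0 < PySem.List.pyGetD array (↑(i+1)) 0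
      · simp only [if_pos hc] at *
        refine ⟨by omega, by push_cast; omega, by simpa using hc.2⟩
      · simp only [if_neg hc] at hk; omega
    · have hk' : (k : Int) < pvHrun (array.drop i) := by push_cast at hk; omega
      obtain ⟨h1, h2, h3⟩ := ih (by omega) hk'
      have h := pvHr_eq array (i + k) h1
      have hpos : (1:Int) < pvHrun (array.drop (i + k)) := by push_cast at hk; omega
      by_cases hc : i + k + 1 < array.length ∧ PySem.List.pyGetD array (↑(i+k)) 0 < PySem.List.pyGetD array (↑(i+k+1)) 0
      · rw [if_pos hc] at h
        refine ⟨by omega, ?_, ?_⟩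
        · have : pvHrun (array.drop (i + (k+1))) = pvHrun (array.drop (i+k)) - 1 := by
            rw [show i + (k+1) = i + k + 1 by omega] at *; omega
          rw [this, h2]; push_cast; omega
        · have := hc.2
          rw [show i + (k+1) = i + k + 1 by omega]
          omega
      · rw [if_neg hc] at h; omega

theorem pvR_get (array : List Int) (l m : Nat) (hm : m < array.length) :
    PySem.List.pyGetD (pvR array l) (↑m) 0 = if m < l then 1 else pvHrun (array.drop m) := by
  rw [PySem.List.pyGetD_natCast]
  rw [List.getD_eq_getElem _ _ (by simp [pvR]; omega)]
  simp [pvR]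

theorem pvR_set (array : List Int) (i : Nat) (hi : i < array.length) :
    PySem.List.pySetD (pvR array (i+1)) (↑i) (pvHrun (array.drop i)) = pvR array i := by
  rw [PySem.List.pySetD_natCast]
  apply List.ext_getElem
  · simp [pvR]
  · intro k h1 h2
    simp only [pvR, List.getElem_set, List.getElem_map, List.getElem_range]
    by_cases hk : k = i
    · subst hk; simp
    · have hik : ¬ i = k := fun h => hk h.symm
      rw [if_neg hik]
      split <;> split <;> first | rfl | omega

theorem pvR_one (array : List Int) (i : Nat) (hi : i < array.length)
    (h1 : pvHrun (array.drop i) = 1) : pvR array (i+1) = pvR array i := by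
  unfold pvR
  apply List.map_congr_left
  intro k hk
  by_cases hki : k = i
  · subst hki; simp [h1]
  · split <;> split <;> first | rfl | omega

theorem pvInner_b (array : List Int) (i : Nat) (hi : i < array.length) (m : Nat)
    (h1 : i + 1 ≤ m) (h2 : (↑m : Int) ≤ ↑i + pvHrun (array.drop i)) :
    pvInnerA array ↑i (PySem.List.pyRange ↑m (↑i + pvHrun (array.drop i)) 1)
      (PySem.List.pySetD (pvR array (i+1)) ↑i (pvHrun (array.drop i)))
      (↑i + pvHrun (array.drop i))
    = (PySem.List.pySetD (pvR array (i+1)) ↑i (pvHrun (array.drop i)),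
       ↑i + pvHrun (array.drop i)) := by
  by_cases hlt : (↑m : Int) < ↑i + pvHrun (array.drop i)
  · obtain ⟨hmn, hhr, hcmp⟩ := pvRun array i hi (m - i) (by omega) (by push_cast; omega)
    rw [show i + (m - i) = m by omega] at hmn hhr hcmp
    rw [PySem.List.pyRange_one_cons hlt]
    have hilen : i < (pvR array (i+1)).length := by simp [pvR]; exact hi
    simp only [pvInnerA, if_pos hcmp]
    rw [PySem.List.pyGetD_pySetD_natCast (pvR array (i+1)) i i _ 0 hilen,
        PySem.List.pyGetD_pySetD_natCast (pvR array (i+1)) i m _ 0 hilen,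
        if_pos rfl, if_neg (by omega : ¬ m = i)]
    rw [pvR_get array (i+1) m hmn, if_neg (by omega), hhr]
    have hmax : max (pvHrun (array.drop i)) (1 + (pvHrun (array.drop i) - ↑(m - i)))
        = pvHrun (array.drop i) := by
      apply max_eq_left; push_cast; omega
    rw [hmax]
    rw [PySem.List.pySetD_natCast, PySem.List.pySetD_natCast, List.set_set,
        ← PySem.List.pySetD_natCast]
    rw [show ((m : Int) + 1) = ((m + 1 : Nat) : Int) by push_cast; ring]
    exact pvInner_b array i hi (m+1) (by omega) (by push_cast; omega)
  · rw [PySem.List.pyRange_one_eq_nil (by omega), pvInnerA]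
termination_by array.length - m
decreasing_by
  have := pvHrun_le (array.drop i)
  simp [List.length_drop] at this
  omega

theorem pvInner_full (array : List Int) (i : Nat) (hi : i < array.length) :
    pvInnerA array ↑i (PySem.List.pyRange (↑i + 1) (pvE array (i+1)) 1)
      (pvR array (i+1)) (pvE array (i+1))
    = (pvR array i, pvE array i) := by
  have heq := pvHr_eq array i hi
  by_cases h2 : i + 1 < array.length
  · have hE1 : pvE array (i+1) = ↑(i+1) + pvHrun (array.drop (i+1)) := by simp [pvE, h2]
    have hpos1 : 1 ≤ pvHrun (array.drop (i+1)) := by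
      apply pvHrun_pos
      intro hnil; rw [List.drop_eq_nil_iff] at hnil; omega
    by_cases hc : PySem.List.pyGetD array ↑i 0 < PySem.List.pyGetD array ↑(i+1) 0
    · have hri : pvHrun (array.drop i) = 1 + pvHrun (array.drop (i+1)) := by
        rw [heq, if_pos ⟨h2, hc⟩]
      have hEe : pvE array (i+1) = ↑i + pvHrun (array.drop i) := by
        rw [hE1, hri]; push_cast; ring
      rw [hEe]
      have hlt : (↑i + 1 : Int) < ↑i + pvHrun (array.drop i) := by omega
      rw [PySem.List.pyRange_one_cons hlt]
      simp only [pvInnerA]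
      rw [show ((i:Int) + 1) = ((i+1 : Nat) : Int) by push_cast; ring]
      rw [if_pos hc]
      rw [pvR_get array (i+1) i hi, if_pos (by omega),
          pvR_get array (i+1) (i+1) h2, if_neg (by omega)]
      have hmax : max 1 (1 + pvHrun (array.drop (i+1))) = pvHrun (array.drop i) := by
        rw [hri]; exact max_eq_right (by omega)
      rw [hmax]
      rw [show (((i+1 : Nat) : Int) + 1) = ((i+2 : Nat) : Int) by push_cast; ring]
      rw [pvInner_b array i hi (i+2) (by omega) (by rw [hri]; push_cast; omega)]
      rw [pvR_set array i hi]
      simp [pvE, hi]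
    · have hri : pvHrun (array.drop i) = 1 := by
        rw [heq, if_neg (by tauto)]
      have hlt : (↑i + 1 : Int) < pvE array (i+1) := by rw [hE1]; push_cast; omega
      rw [PySem.List.pyRange_one_cons hlt]
      simp only [pvInnerA]
      rw [show ((i:Int) + 1) = ((i+1 : Nat) : Int) by push_cast; ring]
      rw [if_neg hc, pvR_one array i hi hri]
      simp [pvE, hi, hri]
  · have hri : pvHrun (array.drop i) = 1 := by
      rw [heq, if_neg (by intro hx; exact h2 hx.1)]
    have hE1 : pvE array (i+1) = (array.length : Int) := by simp [pvE, h2]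
    rw [hE1, PySem.List.pyRange_one_eq_nil (by push_cast; omega)]
    simp only [pvInnerA]
    rw [pvR_one array i hi hri]
    simp [pvE, hi, hri]
    omega

theorem pvOuter (array : List Int) :
    ∀ (i : Nat), i ≤ array.length →
      pvOuterA array (PySem.List.pyRange (↑i - 1) (-1) (-1)) (pvR array i) (pvE array i)
      = (pvR array 0, pvE array 0) := by
  intro i
  induction i with
  | zero =>
    intro _
    rw [show ((0:Nat):Int) - 1 = -1 by norm_num]
    rw [PySem.List.pyRange_neg_one_eq_nil (by omega : (-1:Int) ≤ -1)]
    rfl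
  | succ i ih =>
    intro h
    rw [show (((i+1 : Nat)):Int) - 1 = (i : Int) by push_cast; ring,
        PySem.List.pyRange_neg_one_cons (by omega : (-1:Int) < ↑i)]
    simp only [pvOuterA]
    rw [pvInner_full array i (by omega)]
    exact ih (by omega)

theorem pvFoldlMax (l : List Int) (a b : Int) :
    List.foldl max (max a b) l = max a (List.foldl max b l) := by
  induction l generalizing b with
  | nil => simp
  | cons c l ih =>
    simp only [List.foldl_cons]
    rw [max_assoc, ih]

theorem pvMax (l : List Int) (h : l ≠ []) :
    PySem.List.max? ((List.range l.length).map (fun k => pvHrun (l.drop k))) (fun x => x)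
      = some (pvMrun l) := by
  have hM : ∀ (a : Int) (r : List Int),
      (List.range (a :: r).length).map (fun k => pvHrun ((a :: r).drop k))
        = pvHrun (a :: r) :: (List.range r.length).map (fun k => pvHrun (r.drop k)) := by
    intro a r
    rw [List.length_cons, List.range_succ_eq_map, List.map_cons, List.map_map]
    simp [Function.comp]
  match l with
  | [x] =>
    rw [hM]
    simp [PySem.List.max?_id_cons, pvMrun, pvHrun]
  | x :: y :: t =>
    have ih := pvMax (y :: t) (by simp)
    rw [hM] at ih
    rw [PySem.List.max?_id_cons] at ih
    rw [hM, hM, PySem.List.max?_id_cons]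
    have ihv : List.foldl max (pvHrun (y::t))
        ((List.range t.length).map (fun k => pvHrun (t.drop k))) = pvMrun (y :: t) := by
      injection ih
    rw [List.foldl_cons, pvFoldlMax, ihv]
    congr 1
    rw [show pvMrun (x :: y :: t)
        = if pvHrun (x :: y :: t) > pvMrun (y :: t) then pvHrun (x :: y :: t)
          else pvMrun (y :: t) from rfl]
    rcases max_cases (pvHrun (x :: y :: t)) (pvMrun (y :: t)) with ⟨h1, h2⟩ | ⟨h1, h2⟩ <;>
      rw [h1] <;> split <;> omega

theorem pvFoldr (l : List Int) :
    List.foldr (fun x s => pvAltStep s x) (0, 0, none) l = (pvMrun l, pvHrun l, l.head?) := by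
  induction l with
  | nil => rfl
  | cons x t ih =>
    rw [List.foldr_cons, ih]
    cases t with
    | nil => simp [pvAltStep, pvHrun, pvMrun]
    | cons y t' =>
      have hrun : pvHrun (x :: y :: t') = if x < y then pvHrun (y :: t') + 1 else 1 := by
        rw [show pvHrun (x :: y :: t')
            = if x < y then 1 + pvHrun (y :: t') else 1 from rfl]
        split <;> omega
      simp only [pvAltStep, List.head?]
      refine Prod.ext ?_ (Prod.ext ?_ rfl)
      · show (if (if x < y then pvHrun (y :: t') + 1 else 1) > pvMrun (y :: t')
              then (if x < y then pvHrun (y :: t') + 1 else 1) else pvMrun (y :: t'))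
            = pvMrun (x :: y :: t')
        rw [← hrun]
        rfl
      · show (if x < y then pvHrun (y :: t') + 1 else 1) = pvHrun (x :: y :: t')
        rw [hrun]

theorem pvAlt_eq (array : List Int) : longest_increasing_sub_array_alt array = pvMrun array := by
  unfold longest_increasing_sub_array_alt
  rw [List.foldl_reverse, pvFoldr]

theorem pvA_eq (array : List Int) (h : array ≠ []) :
    longest_increasing_sub_array array = pvMrun array := by
  have hR : List.replicate array.length (1:Int) = pvR array array.length := by
    apply List.ext_getElem
    · simp [pvR]
    · intro k h1 h2
      simp only [pvR, List.getElem_replicate, List.getElem_map, List.getElem_range]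
      rw [if_pos (by simp at h1; omega)]
  have hE : (array.length : Int) = pvE array array.length := by simp [pvE]
  unfold longest_increasing_sub_array
  simp only []
  rw [hR]
  rw [show pvOuterA array (PySem.List.pyRange ((array.length : Int) - 1) (-1) (-1))
        (pvR array array.length) (array.length : Int)
      = pvOuterA array (PySem.List.pyRange (((array.length : Nat) : Int) - 1) (-1) (-1))
        (pvR array array.length) (pvE array array.length) from by rw [← hE]]
  rw [pvOuter array array.length le_rfl]
  have hR0 : pvR array 0 = (List.range array.length).map (fun k => pvHrun (array.drop k)) := by
    simp [pvR]
  rw [hR0]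
  rw [pvMax array h]
  rfl

-- ===== VERDICT (by name: the statement is the Claim_ definition above) =====
theorem longest_increasing_sub_array_spec : Claim_equal_longest_increasing_sub_array := by
  intro array _ hpre
  unfold Spec_longest_increasing_sub_array
  rw [pvA_eq array hpre, pvAlt_eq]
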